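-- pv_equiv track=rewrite | github.com/haihaimx/HaloWebUI | backend/open_webui/routers/images.py | _pick_personal_connection
-- ===== SOURCE A (Python) =====
-- from typing import Optional
--
-- def _pick_personal_connection(
--     base_urls: list[str], keys: list[str], preferred_index: Optional[int] = None
-- ) -> Optional[tuple[int, str, str]]:
--     usable: list[tuple[int, str, str]] = []
--     for idx, (url, key) in enumerate(zip(base_urls or [], keys or [])):
--         u = str(url or "").strip()
--         k = str(key or "").strip()
--         if u and k:
--             usable.append((idx, u, k))
--
--     if not usable:
--         return None
--
--     if preferred_index is not None:
--         for item in usable: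
--             if item[0] == preferred_index:
--                 return item
--
--     return usable[0]
-- ===== SOURCE B (Python) =====
-- from typing import Optional
--
-- def _pick_personal_connection(
--     base_urls: list[str], keys: list[str], preferred_index: Optional[int] = None
-- ) -> Optional[tuple[int, str, str]]:
--     first_usable = None
--     preferred_match = None
--     for idx, (url, key) in enumerate(zip(base_urls or [], keys or [])):
--         u = str(url or "").strip()
--         k = str(key or "").strip()
--         if u and k:
--             item = (idx, u, k)
--             if first_usable is None:
--                 first_usable = item
--             if preferred_match is None and preferred_index is not None and idx == preferred_index:
--                 preferred_match = item
--     if first_usable is None: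
--         return None
--     return preferred_match if preferred_match is not None else first_usable
-- ===== Notes on version B (the rewrite author's own statement) =====
-- stated objective: simpler
-- what changed: Replaced the intermediate 'usable' list plus a second scan for the preferred index by a single pass that tracks only two locals (first usable item, preferred match) and resolves them after the loop.
import Mathlib
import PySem

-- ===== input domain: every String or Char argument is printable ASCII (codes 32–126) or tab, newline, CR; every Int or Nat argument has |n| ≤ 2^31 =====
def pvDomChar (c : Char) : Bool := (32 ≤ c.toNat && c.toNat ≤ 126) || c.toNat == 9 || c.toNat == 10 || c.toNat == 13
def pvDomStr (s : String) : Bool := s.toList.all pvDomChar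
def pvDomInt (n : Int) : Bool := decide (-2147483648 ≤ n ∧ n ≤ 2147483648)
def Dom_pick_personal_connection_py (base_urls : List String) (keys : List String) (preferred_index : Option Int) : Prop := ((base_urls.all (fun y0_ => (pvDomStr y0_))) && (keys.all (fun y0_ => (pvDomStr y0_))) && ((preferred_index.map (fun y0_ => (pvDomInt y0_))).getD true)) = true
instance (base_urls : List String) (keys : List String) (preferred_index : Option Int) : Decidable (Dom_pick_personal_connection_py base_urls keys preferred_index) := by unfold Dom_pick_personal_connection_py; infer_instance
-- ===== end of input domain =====

-- B drops the intermediate 'usable' list and the second scan of A: one pass keeps just the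
-- first usable item and the preferred match, combined after the loop (objective: simpler).

-- ===== PORT A =====
def pick_personal_connection_py (base_urls : List String) (keys : List String) (preferred_index : Option Int) : Option (Int × String × String) :=
  let usable : List (Int × String × String) :=
    (PySem.List.enumerate (base_urls.zip keys)).foldl
      (fun acc x =>
        let u := PySem.Str.strip x.2.1
        let k := PySem.Str.strip x.2.2
        if (u != "") && (k != "") then acc ++ [(x.1, u, k)] else acc) []
  if usable.isEmpty then none
  else
    match preferred_index with
    | some p =>
      match usable.find? (fun item => item.1 == p) with
      | some item => some item
      | none => usable.head?
    | none => usable.head?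

-- ===== PORT B =====
def pick_personal_connection_py_alt (base_urls : List String) (keys : List String) (preferred_index : Option Int) : Option (Int × String × String) :=
  let st : Option (Int × String × String) × Option (Int × String × String) :=
    (PySem.List.enumerate (base_urls.zip keys)).foldl
      (fun st x =>
        let u := PySem.Str.strip x.2.1
        let k := PySem.Str.strip x.2.2
        if (u != "") && (k != "") then
          let item : Int × String × String := (x.1, u, k)
          let first := match st.1 with | none => some item | some f => some f
          let pref := match st.2 with
            | some m => some m
            | none =>
              match preferred_index with
              | some p => if x.1 == p then some item else none
              | none => none
          (first, pref)
        else st) (none, none)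
  match st.1 with
  | none => none
  | some f => match st.2 with | some m => some m | none => some f

-- ===== PRECONDITION & SPEC =====
def Spec_pick_personal_connection_py (base_urls : List String) (keys : List String) (preferred_index : Option Int) (out : Option (Int × String × String)) : Prop := out = pick_personal_connection_py_alt base_urls keys preferred_index
instance (base_urls : List String) (keys : List String) (preferred_index : Option Int) (out : Option (Int × String × String)) : Decidable (Spec_pick_personal_connection_py base_urls keys preferred_index out) := by unfold Spec_pick_personal_connection_py; infer_instance

-- ===== CLAIM (what is proved, stated in full; the proofs are below) =====
def Claim_equal_pick_personal_connection_py : Prop := ∀ (base_urls : List String) (keys : List String) (preferred_index : Option Int), Dom_pick_personal_connection_py base_urls keys preferred_index → Spec_pick_personal_connection_py base_urls keys preferred_index (pick_personal_connection_py base_urls keys preferred_index)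

-- ===== LEMMAS AND PROOFS =====

-- the usability test and the item built from an enumerated (index, (url, key)) pair
def pvP (x : Int × String × String) : Bool :=
  (PySem.Str.strip x.2.1 != "") && (PySem.Str.strip x.2.2 != "")

def pvF (x : Int × String × String) : Int × String × String :=
  (x.1, PySem.Str.strip x.2.1, PySem.Str.strip x.2.2)

-- B's fold characterized: first component = old-or-first usable item, second = old-or-preferred match
lemma pvBfold (pf : Option Int) (l : List (Int × String × String))
    (st : Option (Int × String × String) × Option (Int × String × String)) :
    l.foldl
      (fun st x =>
        let u := PySem.Str.strip x.2.1
        let k := PySem.Str.strip x.2.2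
        if (u != "") && (k != "") then
          let item : Int × String × String := (x.1, u, k)
          let first := match st.1 with | none => some item | some f => some f
          let pref := match st.2 with
            | some m => some m
            | none =>
              match pf with
              | some p => if x.1 == p then some item else none
              | none => none
          (first, pref)
        else st) st =
      (st.1.or ((l.filter pvP).map pvF).head?,
       st.2.or (match pf with
         | some p => ((l.filter pvP).map pvF).find? (fun item => item.1 == p)
         | none => none)) := by
  induction l generalizing st with
  | nil => cases pf <;> simp [Option.or_none]
  | cons x xs ih =>
    by_cases hx : pvP x = true
    · have hx' : ((PySem.Str.strip x.2.1 != "") && (PySem.Str.strip x.2.2 != "")) = true := hx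
      have hfil : (x :: xs).filter pvP = x :: xs.filter pvP := by
        simp [List.filter_cons, hx]
      simp only [List.foldl_cons, hx', if_true]
      rw [ih, hfil]
      simp only [List.map_cons, List.head?_cons, List.find?_cons, Prod.mk.injEq]
      constructor
      · cases st.1 <;> simp [pvF, Option.or]
      · cases st.2 with
        | some m => simp [Option.or]
        | none =>
          cases pf with
          | none => simp
          | some p =>
            by_cases hp : (x.1 == p) = true <;> simp [pvF, hp, Option.or]
    · have hx' : ((PySem.Str.strip x.2.1 != "") && (PySem.Str.strip x.2.2 != "")) = false := by
        simpa [pvP] using hx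
      have hfil : (x :: xs).filter pvP = xs.filter pvP := by
        simp [List.filter_cons, hx]
      simp only [List.foldl_cons, hx', Bool.false_eq_true, if_false]
      rw [ih, hfil]

-- A's fold characterized via the LOOP-SHAPE lemma
lemma pvAfold (l : List (Int × String × String)) :
    l.foldl
      (fun acc x =>
        let u := PySem.Str.strip x.2.1
        let k := PySem.Str.strip x.2.2
        if (u != "") && (k != "") then acc ++ [(x.1, u, k)] else acc) [] =
    (l.filter pvP).map pvF := by
  simpa [pvP, pvF] using
    PySem.List.foldl_append_if (l := l) (p := pvP) (f := pvF)
      (acc := ([] : List (Int × String × String)))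

-- ===== VERDICT (by name: the statement is the Claim_ definition above) =====
theorem pick_personal_connection_py_spec : Claim_equal_pick_personal_connection_py := by
  intro base_urls keys pf _
  unfold Spec_pick_personal_connection_py
  unfold pick_personal_connection_py pick_personal_connection_py_alt
  rw [pvAfold (PySem.List.enumerate (base_urls.zip keys)),
      pvBfold pf (PySem.List.enumerate (base_urls.zip keys)) (none, none)]
  cases husable : (((PySem.List.enumerate (base_urls.zip keys)).filter pvP).map pvF) with
  | nil => cases pf <;> simp
  | cons a as =>
    cases pf with
    | none => simp
    | some p =>
      simp only [List.isEmpty_cons, Option.none_or, Bool.false_eq_true, if_false]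
      cases hf : ((a :: as).find? (fun item => item.1 == p)) <;> simp
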